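-- pv_equiv track=rewrite | github.com/ThinhHong/Personal-Projects | League/test.py | solution
-- ===== SOURCE A (Python) =====
-- def solution(a, b, k):
--     bowls_can = []
--     ingredients_left = []
--     for i in range(len(a)):
--         bowls_can.append(b[i]//a[i])
--         ingredients_left.append(b[i]%a[i])
--
--     min_bowls = min(bowls_can)
--     min_index = bowls_can.index(min_bowls)
--     for i in range(k):
--        ingredients_left[min_index] += 1
--        if ingredients_left[min_index] % a[min_index] == 0:
--            ingredients_left[min_index] = 0
--            bowls_can[min_index] += 1
--            min_bowls = min(bowls_can)
--            min_index = bowls_can.index(min_bowls)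
--
--     return min_bowls
-- ===== SOURCE B (Python) =====
-- def solution(a, b, k):
--     # Batched greedy: instead of dropping ingredients one by one, jump the current
--     # minimum bowl a whole level at a time: 'need' ingredients complete its level.
--     levels = [y // x for x, y in zip(a, b)]
--     left = [y % x for x, y in zip(a, b)]
--     while True:
--         m = min(levels)
--         j = levels.index(m)
--         need = abs(a[j]) - left[j] % abs(a[j])
--         if need > k:
--             return m
--         k -= need
--         levels[j] += 1
--         left[j] = 0
-- ===== Notes on version B (the rewrite author's own statement) =====
-- stated objective: alternative
-- what changed: Replaces A's one-ingredient-at-a-time simulation (k loop iterations with a per-unit divisibility test) by a batched greedy that computes need = abs(a[j]) - left[j] % abs(a[j]) and completes a whole level of the minimum bowl per iteration; it trades the k unit steps for one arithmetic step per level completion.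
import Mathlib
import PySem

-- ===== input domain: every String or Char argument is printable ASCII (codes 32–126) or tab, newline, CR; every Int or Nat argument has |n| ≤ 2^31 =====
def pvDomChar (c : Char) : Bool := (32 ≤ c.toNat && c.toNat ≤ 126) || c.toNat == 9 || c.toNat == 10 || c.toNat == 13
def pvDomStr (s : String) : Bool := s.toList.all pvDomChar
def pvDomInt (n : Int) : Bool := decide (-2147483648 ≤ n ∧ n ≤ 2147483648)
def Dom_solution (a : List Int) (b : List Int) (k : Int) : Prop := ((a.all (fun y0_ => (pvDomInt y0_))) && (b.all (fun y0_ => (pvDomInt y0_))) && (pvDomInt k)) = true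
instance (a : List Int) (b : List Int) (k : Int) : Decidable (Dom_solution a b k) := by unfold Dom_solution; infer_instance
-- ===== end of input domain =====

-- B replaces A's one-ingredient-at-a-time greedy loop by a batched greedy that jumps the
-- minimum bowl a whole level per iteration (objective: alternative algorithm, same cost).

-- ===== PORT A =====
-- for i in range(len(a)): bowls_can.append(b[i]//a[i]); ingredients_left.append(b[i]%a[i])
def buildCL (a : List Int) (b : List Int) : List Int × List Int :=
  (PySem.List.pyRange 0 (a.length : Int) 1).foldl
    (fun st i =>
      (st.1 ++ [PySem.Int.floordiv (PySem.List.pyGetD b i 0) (PySem.List.pyGetD a i 0)],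
       st.2 ++ [PySem.Int.mod (PySem.List.pyGetD b i 0) (PySem.List.pyGetD a i 0)]))
    ([], [])

-- the 'for i in range(k)' loop, state (bowls_can, ingredients_left, min_bowls, min_index)
def solLoopA (a : List Int) : Nat → List Int × List Int × Int × Int → List Int × List Int × Int × Int
  | 0, st => st
  | s+1, (c, l, m, j) =>
    let l1 := PySem.List.pySetD l j (PySem.List.pyGetD l j 0 + 1)
    if PySem.Int.mod (PySem.List.pyGetD l1 j 0) (PySem.List.pyGetD a j 0) = 0 then
      let l2 := PySem.List.pySetD l1 j 0
      let c1 := PySem.List.pySetD c j (PySem.List.pyGetD c j 0 + 1)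
      let m1 := (PySem.List.min? c1 (fun x => x)).getD 0
      let j1 := (((PySem.List.index? c1 m1).getD 0 : Nat) : Int)
      solLoopA a s (c1, l2, m1, j1)
    else
      solLoopA a s (c, l1, m, j)

def solution (a : List Int) (b : List Int) (k : Int) : Int :=
  let cl := buildCL a b
  let m := (PySem.List.min? cl.1 (fun x => x)).getD 0
  let j := (((PySem.List.index? cl.1 m).getD 0 : Nat) : Int)
  (solLoopA a k.toNat (cl.1, cl.2, m, j)).2.2.1

-- ===== PORT B =====
-- the 'while True' loop; the Nat argument is pure fuel (k.toNat + 1 suffices: every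
-- iteration that does not return consumes need ≥ 1 from the budget k)
def bLoop (a : List Int) : Nat → List Int → List Int → Int → Int
  | 0, levels, _, _ => (PySem.List.min? levels (fun x => x)).getD 0
  | f+1, levels, left, k =>
    let m := (PySem.List.min? levels (fun x => x)).getD 0
    let j := (((PySem.List.index? levels m).getD 0 : Nat) : Int)
    let need := |PySem.List.pyGetD a j 0| - PySem.Int.mod (PySem.List.pyGetD left j 0) |PySem.List.pyGetD a j 0|
    if need > k then m
    else bLoop a f (PySem.List.pySetD levels j (PySem.List.pyGetD levels j 0 + 1))
                   (PySem.List.pySetD left j 0) (k - need)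

def solution_alt (a : List Int) (b : List Int) (k : Int) : Int :=
  let levels := (a.zip b).map (fun p => PySem.Int.floordiv p.2 p.1)
  let left := (a.zip b).map (fun p => PySem.Int.mod p.2 p.1)
  bLoop a (k.toNat + 1) levels left k

-- ===== PRECONDITION & SPEC =====
-- Pre_ excludes exactly the inputs where A raises: empty a (ValueError from min([])),
-- b shorter than a (IndexError), and a zero element of a (ZeroDivisionError).
def Pre_solution (a : List Int) (b : List Int) (k : Int) : Prop :=
  a ≠ [] ∧ a.length ≤ b.length ∧ ∀ x ∈ a, x ≠ 0
instance (a : List Int) (b : List Int) (k : Int) : Decidable (Pre_solution a b k) := by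
  unfold Pre_solution; infer_instance

def pvWitness_solution : List Int × List Int × Int := ([2, -3], [7, 5], 4)

def Spec_solution (a : List Int) (b : List Int) (k : Int) (out : Int) : Prop := out = solution_alt a b k
instance (a : List Int) (b : List Int) (k : Int) (out : Int) : Decidable (Spec_solution a b k out) := by unfold Spec_solution; infer_instance

-- ===== CLAIM (what is proved, stated in full; the proofs are below) =====
def Claim_equal_solution : Prop := ∀ (a : List Int) (b : List Int) (k : Int), Dom_solution a b k → Pre_solution a b k → Spec_solution a b k (solution a b k)

-- ===== LEMMAS AND PROOFS =====

lemma buildCL_eq (a b : List Int) :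
    buildCL a b = ((List.range a.length).map (fun i => PySem.Int.floordiv (b.getD i 0) (a.getD i 0)),
                   (List.range a.length).map (fun i => PySem.Int.mod (b.getD i 0) (a.getD i 0))) := by
  unfold buildCL
  rw [PySem.List.foldl_prod_mk
      (f := fun s e => s ++ [PySem.Int.floordiv (PySem.List.pyGetD b e 0) (PySem.List.pyGetD a e 0)])
      (g := fun s e => s ++ [PySem.Int.mod (PySem.List.pyGetD b e 0) (PySem.List.pyGetD a e 0)])]
  rw [PySem.List.foldl_append_singleton_eq_map, PySem.List.foldl_append_singleton_eq_map]
  rw [PySem.List.pyRange_zero_nat]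
  simp [List.map_map, Function.comp_def]

lemma zipmap_eq (a b : List Int) (h : a.length ≤ b.length) (f : Int → Int → Int) :
    (a.zip b).map (fun p => f p.1 p.2) = (List.range a.length).map (fun i => f (a.getD i 0) (b.getD i 0)) := by
  apply List.ext_getElem
  · simp; omega
  · intro i h1 h2
    simp only [List.getElem_map, List.getElem_zip, List.getElem_range]
    have hia : i < a.length := by simp at h1; omega
    rw [List.getD_eq_getElem a 0 hia, List.getD_eq_getElem b 0 (by omega)]

lemma getD_set' (xs : List Int) {jn i : Nat} (v : Int) (hi : i < xs.length) :
    (xs.set jn v).getD i 0 = if i = jn then v else xs.getD i 0 := by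
  rw [List.getD_eq_getElem _ 0 (by rw [List.length_set]; exact hi), List.getElem_set,
      List.getD_eq_getElem _ 0 hi]
  by_cases h : i = jn
  · simp [h]
  · simp [h]
    intro hh; exact absurd hh.symm h

lemma minIndex_spec (c : List Int) (hne : c ≠ []) :
    ∃ (m : Int) (jn : Nat), (PySem.List.min? c (fun x => x)).getD 0 = m ∧
      (PySem.List.index? c m).getD 0 = jn ∧ jn < c.length ∧ c.getD jn 0 = m ∧
      ∀ i < c.length, m ≤ c.getD i 0 := by
  have hns : (PySem.List.min? c (fun x => x)).isSome := by
    rw [Option.isSome_iff_ne_none]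
    intro h
    exact hne ((PySem.List.min?_eq_none_iff c (fun x => x)).mp h)
  obtain ⟨m, hm⟩ := Option.isSome_iff_exists.mp hns
  have hmem : m ∈ c := PySem.List.min?_mem hm
  have hidx : (PySem.List.index? c m).isSome := (PySem.List.index?_isSome_iff c m).mpr hmem
  obtain ⟨jn, hjn⟩ := Option.isSome_iff_exists.mp hidx
  obtain ⟨hk, hck, -⟩ := PySem.List.getElem_of_index?_eq_some hjn
  refine ⟨m, jn, by rw [hm]; rfl, by rw [hjn]; rfl, hk, ?_, ?_⟩
  · rw [List.getD_eq_getElem c 0 hk, hck]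
  · intro i hi
    rw [List.getD_eq_getElem c 0 hi]
    exact PySem.List.min?_isMin hm _ (c.getElem_mem hi)

-- the number of further ingredients bowl j accepts before completing a level:
-- need = |a| - (l % |a|) is the least s > 0 with a ∣ l + s
lemma need_facts (aj l0 : Int) (ha : aj ≠ 0) :
    1 ≤ |aj| - PySem.Int.mod l0 |aj| ∧
    (∀ s : Int, 0 < s → s < |aj| - PySem.Int.mod l0 |aj| → ¬ aj ∣ (l0 + s)) ∧
    aj ∣ (l0 + (|aj| - PySem.Int.mod l0 |aj|)) := by
  have habs : 0 < |aj| := abs_pos.mpr ha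
  have hr0 := PySem.Int.mod_nonneg l0 habs
  have hrlt := PySem.Int.mod_lt l0 habs
  have hid := PySem.Int.floordiv_mul_add_mod l0 |aj|
  have hdvd : |aj| ∣ (l0 - PySem.Int.mod l0 |aj|) := ⟨PySem.Int.floordiv l0 |aj|, by rw [mul_comm]; omega⟩
  refine ⟨by omega, ?_, ?_⟩
  · intro s hs1 hs2 hcon
    have h1 : |aj| ∣ (l0 + s) := (abs_dvd aj (l0 + s)).mpr hcon
    have h2 : |aj| ∣ (s + PySem.Int.mod l0 |aj|) := by
      have := Int.dvd_sub h1 hdvd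
      have he : l0 + s - (l0 - PySem.Int.mod l0 |aj|) = s + PySem.Int.mod l0 |aj| := by ring
      rwa [he] at this
    have := Int.le_of_dvd (by omega) h2
    omega
  · apply (abs_dvd aj _).mp
    have he : l0 + (|aj| - PySem.Int.mod l0 |aj|) = (l0 - PySem.Int.mod l0 |aj|) + |aj| := by ring
    rw [he]
    exact Int.dvd_add hdvd ⟨1, by ring⟩

-- running A's loop while the current bowl is still short of its level never changes the answer
lemma climbA_lt (a c : List Int) (m : Int) (jn : Nat) (l0j need : Int)
    (hN2 : ∀ s : Int, 0 < s → s < need → ¬ a.getD jn 0 ∣ (l0j + s)) :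
    ∀ (f : Nat) (t : Int) (l' : List Int), jn < l'.length → l'.getD jn 0 = l0j + t →
      0 ≤ t → (t + f : Int) < need →
      (solLoopA a f (c, l', m, (jn : Int))).2.2.1 = m := by
  intro f
  induction f with
  | zero => intro t l' _ _ _ _; simp [solLoopA]
  | succ f ih =>
    intro t l' hlen hget ht hlt
    simp only [solLoopA, PySem.List.pySetD_natCast, PySem.List.pyGetD_natCast]
    rw [getD_set' l' _ hlen, if_pos rfl, hget]
    rw [if_neg ?_]
    · exact ih (t + 1) (l'.set jn (l0j + t + 1)) (by rw [List.length_set]; exact hlen)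
        (by rw [getD_set' l' _ hlen, if_pos rfl]; ring)
        (by omega) (by omega)
    · intro hmod
      exact hN2 (t + 1) (by omega) (by push_cast at hlt; omega)
        (by rw [← add_assoc]; exact (PySem.Int.mod_eq_zero_iff_dvd _ _).mp hmod)

-- running A's loop through the completion of the current bowl's level = one batched step
lemma climbA_run (a c : List Int) (m : Int) (jn : Nat) (l0j need : Int)
    (hN2 : ∀ s : Int, 0 < s → s < need → ¬ a.getD jn 0 ∣ (l0j + s))
    (hN3 : a.getD jn 0 ∣ (l0j + need)) :
    ∀ (f : Nat) (t : Int) (l' : List Int), jn < l'.length → l'.getD jn 0 = l0j + t →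
      0 ≤ t → t < need → need ≤ t + f →
      solLoopA a f (c, l', m, (jn : Int)) =
        solLoopA a (f - (need - t).toNat)
          (c.set jn (c.getD jn 0 + 1), l'.set jn 0,
           (PySem.List.min? (c.set jn (c.getD jn 0 + 1)) (fun x => x)).getD 0,
           (((PySem.List.index? (c.set jn (c.getD jn 0 + 1))
               ((PySem.List.min? (c.set jn (c.getD jn 0 + 1)) (fun x => x)).getD 0)).getD 0 : Nat) : Int)) := by
  intro f
  induction f with
  | zero => intro t l' _ _ _ _ _; omega
  | succ f ih =>
    intro t l' hlen hget ht htlt hge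
    simp only [solLoopA, PySem.List.pySetD_natCast, PySem.List.pyGetD_natCast]
    rw [getD_set' l' _ hlen, if_pos rfl, hget]
    by_cases hdone : t + 1 = need
    · rw [if_pos ((PySem.Int.mod_eq_zero_iff_dvd _ _).mpr (by rw [add_assoc, hdone]; exact hN3))]
      rw [List.set_set]
      rw [show f + 1 - (need - t).toNat = f by omega]
    · rw [if_neg ?_]
      · rw [show f + 1 - (need - t).toNat = f - (need - (t + 1)).toNat by omega]
        refine (ih (t + 1) (l'.set jn (l0j + t + 1)) (by rw [List.length_set]; exact hlen)
          (by rw [getD_set' l' _ hlen, if_pos rfl]; ring)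
          (by omega) (by omega) (by omega)).trans ?_
        rw [List.set_set]
      · intro hmod
        exact hN2 (t + 1) (by omega) (by omega)
          (by rw [← add_assoc]; exact (PySem.Int.mod_eq_zero_iff_dvd _ _).mp hmod)

-- the two loops compute the same answer from the same (levels, leftovers) state
lemma AB_loop (a : List Int) (hne : a ≠ []) (h0 : ∀ x ∈ a, x ≠ 0) :
    ∀ (fb : Nat) (c l : List Int) (k : Int),
      c.length = a.length → l.length = a.length → k.toNat ≤ fb →
      (solLoopA a k.toNat (c, l, (PySem.List.min? c (fun x => x)).getD 0,
        (((PySem.List.index? c ((PySem.List.min? c (fun x => x)).getD 0)).getD 0 : Nat) : Int))).2.2.1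
        = bLoop a (fb + 1) c l k := by
  intro fb
  induction fb using Nat.strong_induction_on with
  | _ fb ih =>
    intro c l k hcl hll hfb
    have hcne : c ≠ [] := by
      intro h
      rw [h] at hcl
      exact hne (List.eq_nil_of_length_eq_zero hcl.symm)
    obtain ⟨m, jn, hm, hj, hjlt, hcj, hmin⟩ := minIndex_spec c hcne
    have hjn : jn < a.length := by omega
    have haj : a.getD jn 0 ≠ 0 := by
      rw [List.getD_eq_getElem a 0 hjn]
      exact h0 _ (a.getElem_mem hjn)
    obtain ⟨hn1, hN2, hN3⟩ := need_facts (a.getD jn 0) (l.getD jn 0) haj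
    set need := |a.getD jn 0| - PySem.Int.mod (l.getD jn 0) |a.getD jn 0| with hneed
    rw [hm, hj]
    simp only [bLoop, PySem.List.pySetD_natCast, PySem.List.pyGetD_natCast]
    rw [hm, hj]
    by_cases hk : need > k
    · rw [if_pos hk]
      exact climbA_lt a c m jn (l.getD jn 0) need hN2 k.toNat 0 l (by omega)
        (by omega) le_rfl (by omega)
    · rw [if_neg hk]
      have hk1 : 1 ≤ k := by omega
      obtain ⟨fb', rfl⟩ : ∃ fb', fb = fb' + 1 := ⟨fb - 1, by omega⟩
      rw [climbA_run a c m jn (l.getD jn 0) need hN2 hN3 k.toNat 0 l (by omega)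
        (by omega) le_rfl (by omega) (by omega)]
      rw [show k.toNat - (need - 0).toNat = (k - need).toNat by omega]
      exact ih fb' (by omega) (c.set jn (c.getD jn 0 + 1)) (l.set jn 0) (k - need)
        (by rw [List.length_set]; exact hcl) (by rw [List.length_set]; exact hll) (by omega)

-- ===== VERDICT (by name: the statement is the Claim_ definition above) =====
theorem solution_spec : Claim_equal_solution := by
  intro a b k _hdom hpre
  obtain ⟨hne, hlen, h0⟩ := hpre
  simp only [Spec_solution, solution, solution_alt]
  have hzipc : (a.zip b).map (fun p => PySem.Int.floordiv p.2 p.1) = (buildCL a b).1 := by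
    rw [zipmap_eq a b hlen (fun x y => PySem.Int.floordiv y x), buildCL_eq]
  have hzipl : (a.zip b).map (fun p => PySem.Int.mod p.2 p.1) = (buildCL a b).2 := by
    rw [zipmap_eq a b hlen (fun x y => PySem.Int.mod y x), buildCL_eq]
  rw [hzipc, hzipl]
  exact AB_loop a hne h0 k.toNat (buildCL a b).1 (buildCL a b).2 k
    (by rw [buildCL_eq]; simp) (by rw [buildCL_eq]; simp) le_rfl
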